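-- pv_equiv track=rewrite | github.com/romilly/marple | src/marple/engine.py | _newlines_to_diamonds
-- ===== SOURCE A (Python) =====
-- def _newlines_to_diamonds(source: str) -> str:
--     """Convert newlines to ⋄ (statement separator), preserving strings."""
--     result: list[str] = []
--     in_string = False
--     for ch in source:
--         if ch == "'" and not in_string:
--             in_string = True
--             result.append(ch)
--         elif ch == "'" and in_string:
--             in_string = False
--             result.append(ch)
--         elif ch == "\n" and not in_string:
--             result.append("⋄")
--         else:
--             result.append(ch)
--     return "".join(result)
-- ===== SOURCE B (Python) =====
-- def _newlines_to_diamonds(source: str) -> str: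
--     parts = source.split("'")
--     fixed = [
--         "".join("⋄" if c == "\n" else c for c in p) if i % 2 == 0 else p
--         for i, p in enumerate(parts)
--     ]
--     return "'".join(fixed)
-- ===== Notes on version B (the rewrite author's own statement) =====
-- stated objective: simpler
-- what changed: Replaces the per-character in_string state machine with split-on-quote, newline substitution in even-indexed (outside-string) segments only, and a quote join.
import Mathlib
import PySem

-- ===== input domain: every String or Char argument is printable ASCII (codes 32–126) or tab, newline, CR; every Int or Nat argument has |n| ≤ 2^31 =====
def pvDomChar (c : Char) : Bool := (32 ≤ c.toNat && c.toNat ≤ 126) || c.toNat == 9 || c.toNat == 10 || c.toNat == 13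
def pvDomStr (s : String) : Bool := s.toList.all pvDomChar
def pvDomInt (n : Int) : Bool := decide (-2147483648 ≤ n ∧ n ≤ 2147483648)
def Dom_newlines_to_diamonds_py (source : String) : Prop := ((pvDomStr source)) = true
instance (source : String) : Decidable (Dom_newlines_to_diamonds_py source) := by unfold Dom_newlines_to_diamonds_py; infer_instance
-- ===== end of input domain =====

-- B replaces A's per-character in_string state machine by split-on-quote / fix even segments / join (objective: simpler).

-- ===== PORT A =====
-- A: one pass with an in_string flag and an accumulating result list (pvStep is the loop body).
def pvStep (st : Bool × List Char) (ch : Char) : Bool × List Char :=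
  let in_string := st.1
  let result := st.2
  if ch = '\'' ∧ ¬ in_string = true then (true, result ++ [ch])
  else if ch = '\'' ∧ in_string = true then (false, result ++ [ch])
  else if ch = '\n' ∧ ¬ in_string = true then (in_string, result ++ ['⋄'])
  else (in_string, result ++ [ch])

def newlines_to_diamonds_py (source : String) : String :=
  let st := source.toList.foldl pvStep (false, [])
  String.mk st.2

-- ===== PORT B =====
-- B: split at quotes; even-indexed segments are outside strings, replace '\n' there; rejoin.
def newlines_to_diamonds_py_alt (source : String) : String :=
  let parts := source.toList.splitOn '\''
  let fixed := (PySem.List.enumerate parts).map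
    (fun ip => if PySem.Int.mod ip.1 2 = 0 then ip.2.map (fun c => if c = '\n' then '⋄' else c) else ip.2)
  String.mk (List.intercalate ['\''] fixed)

-- ===== PRECONDITION & SPEC =====
def Spec_newlines_to_diamonds_py (source : String) (out : String) : Prop := out = newlines_to_diamonds_py_alt source
instance (source : String) (out : String) : Decidable (Spec_newlines_to_diamonds_py source out) := by unfold Spec_newlines_to_diamonds_py; infer_instance

-- ===== CLAIM (what is proved, stated in full; the proofs are below) =====
def Claim_equal_newlines_to_diamonds_py : Prop := ∀ (source : String), Dom_newlines_to_diamonds_py source → Spec_newlines_to_diamonds_py source (newlines_to_diamonds_py source)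

-- ===== LEMMAS AND PROOFS =====

-- A's loop, rewritten as structural recursion producing the output suffix from a given state.
def pvRun : Bool → List Char → List Char
  | _, [] => []
  | b, c :: cs =>
    if c = '\'' then '\'' :: pvRun (!b) cs
    else if c = '\n' ∧ b = false then '⋄' :: pvRun b cs
    else c :: pvRun b cs

def pvFix (p : List Char) : List Char := p.map (fun c => if c = '\n' then '⋄' else c)

-- B's parity map, rewritten as structural recursion with an inside-string flag.
def pvMapAlt : Bool → List (List Char) → List (List Char)
  | _, [] => []
  | b, p :: ps => (if b then p else pvFix p) :: pvMapAlt (!b) ps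

theorem pvFoldl_run (cs : List Char) : ∀ (b : Bool) (acc : List Char),
    (cs.foldl pvStep (b, acc)).2 = acc ++ pvRun b cs := by
  intro b acc
  induction cs generalizing b acc with
  | nil => simp [pvRun]
  | cons c cs ih =>
    rw [List.foldl_cons]
    by_cases hq : c = '\''
    · cases b
      · rw [show pvStep (false, acc) c = (true, acc ++ [c]) by simp [pvStep, hq], ih]
        simp [pvRun, hq]
      · rw [show pvStep (true, acc) c = (false, acc ++ [c]) by simp [pvStep, hq], ih]
        simp [pvRun, hq]
    · by_cases hn : c = '\n'
      · cases b
        · rw [show pvStep (false, acc) c = (false, acc ++ ['⋄']) by simp [pvStep, hn], ih]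
          simp [pvRun, hn]
        · rw [show pvStep (true, acc) c = (true, acc ++ [c]) by simp [pvStep, hn], ih]
          simp [pvRun, hn]
      · cases b
        · rw [show pvStep (false, acc) c = (false, acc ++ [c]) by simp [pvStep, hq, hn], ih]
          simp [pvRun, hq, hn]
        · rw [show pvStep (true, acc) c = (true, acc ++ [c]) by simp [pvStep, hq, hn], ih]
          simp [pvRun, hq, hn]

theorem pvIntercalate_cons (x : List Char) (l : List (List Char)) :
    List.intercalate ['\''] (x :: l) =
      x ++ (if l = [] then [] else '\'' :: List.intercalate ['\''] l) := by
  cases l with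
  | nil => simp [List.intercalate]
  | cons y l => simp [List.intercalate]

theorem pvRun_eq (cs : List Char) : ∀ b,
    pvRun b cs = List.intercalate ['\''] (pvMapAlt b (cs.splitOn '\'')) := by
  induction cs with
  | nil => intro b; cases b <;> simp [pvRun, pvMapAlt, pvFix, List.splitOn, List.splitOnP_nil, List.intercalate]
  | cons c cs ih =>
    intro b
    obtain ⟨p, ps, hps⟩ := List.exists_cons_of_ne_nil (List.splitOnP_ne_nil (· == '\'') cs)
    have hps' : cs.splitOn '\'' = p :: ps := hps
    by_cases hq : c = '\''
    · have hne : pvMapAlt (!b) (cs.splitOn '\'') ≠ [] := by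
        rw [List.splitOn, hps]; simp [pvMapAlt]
      rw [pvRun, if_pos hq, List.splitOn, List.splitOnP_cons]
      simp only [hq, beq_self_eq_true, if_pos]
      rw [show List.splitOnP (· == '\'') cs = cs.splitOn '\'' from rfl]
      rw [pvMapAlt, pvIntercalate_cons, if_neg hne, ih]
      cases b <;> simp [pvFix]
    · rw [pvRun, if_neg hq, List.splitOn, List.splitOnP_cons]
      simp only [beq_iff_eq, hq, ite_false]
      rw [show List.splitOnP (· == '\'') cs = cs.splitOn '\'' from rfl]
      rw [hps', List.modifyHead_cons, pvMapAlt, pvIntercalate_cons]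
      have ihb := ih b
      rw [hps', pvMapAlt, pvIntercalate_cons] at ihb
      cases b with
      | false =>
        by_cases hn : c = '\n' <;>
          simp [hn, pvFix, ihb, List.cons_append]
      | true =>
        have hnn : ¬ (c = '\n' ∧ (true : Bool) = false) := by simp
        simp [ihb, List.cons_append]

theorem pvEnum_eq (parts : List (List Char)) : ∀ (n : Int), 0 ≤ n →
    ((PySem.List.enumerate parts n).map
      (fun ip => if PySem.Int.mod ip.1 2 = 0 then pvFix ip.2 else ip.2))
      = pvMapAlt (decide (PySem.Int.mod n 2 = 1)) parts := by
  intro n hn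
  induction parts generalizing n hn with
  | nil => simp [PySem.List.enumerate, pvMapAlt]
  | cons p ps ih =>
    rw [PySem.List.enumerate, List.map_cons, pvMapAlt]
    have h2 : n.fmod 2 = n % 2 := by rw [Int.fmod_eq_emod]; norm_num
    have h3 : (n + 1).fmod 2 = (n + 1) % 2 := by rw [Int.fmod_eq_emod]; norm_num
    have hrec := ih (n + 1) (by omega)
    by_cases h : n % 2 = 1
    · have h0 : ¬ n % 2 = 0 := by omega
      have h1 : (n + 1) % 2 = 0 := by omega
      simp only [PySem.Int.mod, h3, h1] at hrec
      simp [PySem.Int.mod, h2, h, hrec]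
    · have h0 : n % 2 = 0 := by omega
      have h1 : (n + 1) % 2 = 1 := by omega
      simp only [PySem.Int.mod, h3, h1] at hrec
      simp [PySem.Int.mod, h2, h0, hrec]

-- ===== VERDICT (by name: the statement is the Claim_ definition above) =====
theorem newlines_to_diamonds_py_spec : Claim_equal_newlines_to_diamonds_py := by
  intro source _
  unfold Spec_newlines_to_diamonds_py newlines_to_diamonds_py newlines_to_diamonds_py_alt
  simp only
  rw [pvFoldl_run source.toList false []]
  have h := pvEnum_eq (source.toList.splitOn '\'') 0 (by norm_num)
  simp only [pvFix] at h
  rw [h, List.nil_append, pvRun_eq]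
  norm_num [PySem.Int.mod]
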